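-- pv_equiv track=rewrite | github.com/kristofgilicze/titleminer | titleminer/process.py | filter_common_words
-- ===== SOURCE A (Python) =====
-- def filter_common_words(data: dict) -> dict:
--     COMMON_WORDS = [
--         "több",
--         "éves",
--         "szerint",
--         "volt",
--         "meg",
--         "minden",
--         "jó",
--         "-",
--         "videó",
--         "kép",
--         "A",
--         "a",
--         "az",
--         "és",
--         "is",
--         "nem",
--         "van",
--         "azt",
--         "egy",
--         "nagy",
--         "hogy",
--         "még",
--         "kell",
--         "volt",
--         "nincs",
--         "itt",
--         "már",
--         "miatt",
--     ]
--
--     # filter out common words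
--     for word in COMMON_WORDS:
--         data.pop(word, None)
--
--     return data
-- ===== SOURCE B (Python) =====
-- COMMON_SET = frozenset({
--     "több", "éves", "szerint", "volt", "meg", "minden", "jó", "-",
--     "videó", "kép", "A", "a", "az", "és", "is", "nem", "van", "azt",
--     "egy", "nagy", "hogy", "még", "kell", "nincs", "itt", "már", "miatt",
-- })
--
-- def filter_common_words(data: dict) -> dict:
--     # one filtering pass over the items: build the result dict directly
--     # (returns a new dict; unlike A it does not mutate the argument in place)
--     return {k: v for k, v in data.items() if k not in COMMON_SET}
-- ===== Notes on version B (the rewrite author's own statement) =====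
-- stated objective: idiomatic
-- what changed: A loops over the fixed common-word list popping each key from the dict; B instead makes one comprehension pass over the dict's items, keeping those whose key is not in a precomputed frozenset (return value identical; B returns a new dict instead of mutating the argument).
import Mathlib
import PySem

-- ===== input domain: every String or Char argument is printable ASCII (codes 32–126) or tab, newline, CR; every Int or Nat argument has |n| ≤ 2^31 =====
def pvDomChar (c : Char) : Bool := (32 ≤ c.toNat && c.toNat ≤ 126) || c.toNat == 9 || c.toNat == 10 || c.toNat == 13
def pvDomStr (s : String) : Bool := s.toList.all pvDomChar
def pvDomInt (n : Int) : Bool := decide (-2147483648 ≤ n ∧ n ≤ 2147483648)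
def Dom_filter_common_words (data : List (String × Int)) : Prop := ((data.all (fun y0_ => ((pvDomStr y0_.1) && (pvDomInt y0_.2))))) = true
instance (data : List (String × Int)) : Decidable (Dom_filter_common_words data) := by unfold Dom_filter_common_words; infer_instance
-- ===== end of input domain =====

-- B replaces A's pop-each-common-word loop by a single filtering comprehension over the
-- dict's items; return-value equivalence is what is proved (A mutates the argument dict
-- in place and returns it, B returns a new dict and leaves the argument untouched).

-- ===== PORT A =====
-- the COMMON_WORDS literal of A (in order, including the duplicate "volt")
def pvCommonWords : List String :=
  ["több", "éves", "szerint", "volt", "meg", "minden", "jó", "-", "videó", "kép",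
   "A", "a", "az", "és", "is", "nem", "van", "azt", "egy", "nagy", "hogy", "még",
   "kell", "volt", "nincs", "itt", "már", "miatt"]

-- `data.pop(word, None)` on a dict (unique keys, insertion order) removes the entry with
-- that key if present: exact as `List.eraseP` on the association list (keys unique by Pre_).
def filter_common_words (data : List (String × Int)) : List (String × Int) :=
  pvCommonWords.foldl (fun d w => d.eraseP (fun p => p.1 == w)) data

-- ===== PORT B =====
-- `COMMON_SET = frozenset({…})` : the set built once in Source B
def pvCommonSet : List String := PySem.Set.ofList pvCommonWords

-- `{k: v for k, v in data.items() if k not in COMMON_SET}` : with unique keys (Pre_) the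
-- comprehension over items is exactly a filter of the association list.
def filter_common_words_alt (data : List (String × Int)) : List (String × Int) :=
  data.filter (fun p => decide (p.1 ∉ pvCommonSet))

-- ===== PRECONDITION & SPEC =====
-- A's argument is a Python dict, whose keys are necessarily distinct: association lists
-- with duplicate keys do not represent any input A can receive, so they are excluded.
def Pre_filter_common_words (data : List (String × Int)) : Prop :=
  (data.map Prod.fst).Nodup

instance (data : List (String × Int)) : Decidable (Pre_filter_common_words data) := by
  unfold Pre_filter_common_words; infer_instance

def pvWitness_filter_common_words : (List (String × Int)) := [("hello", 3), ("az", 1)]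

def Spec_filter_common_words (data : List (String × Int)) (out : List (String × Int)) : Prop := out = filter_common_words_alt data
instance (data : List (String × Int)) (out : List (String × Int)) : Decidable (Spec_filter_common_words data out) := by unfold Spec_filter_common_words; infer_instance

-- ===== CLAIM (what is proved, stated in full; the proofs are below) =====
def Claim_equal_filter_common_words : Prop := ∀ (data : List (String × Int)), Dom_filter_common_words data → Pre_filter_common_words data → Spec_filter_common_words data (filter_common_words data)

-- ===== LEMMAS AND PROOFS =====

-- with distinct keys, removing the first entry with key w removes the only one: a filter
theorem pv_eraseP_eq_filter (d : List (String × Int)) (w : String)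
    (h : (d.map Prod.fst).Nodup) :
    d.eraseP (fun p => p.1 == w) = d.filter (fun p => !(p.1 == w)) := by
  induction d with
  | nil => rfl
  | cons hd tl ih =>
    simp only [List.map_cons, List.nodup_cons] at h
    by_cases hk : hd.1 = w
    · simp only [List.eraseP_cons, List.filter_cons, hk, beq_self_eq_true, Bool.not_true,
        Bool.false_eq_true]
      rw [if_neg (by simp)]
      symm
      apply List.filter_eq_self.2
      intro p hp
      have hne : p.1 ≠ w := by
        intro hw
        have : w ∈ tl.map Prod.fst := hw ▸ List.mem_map_of_mem (f := Prod.fst) hp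
        exact h.1 (hk ▸ this)
      simp [hne]
    · have hb : (hd.1 == w) = false := by simp [hk]
      simp [hb, ih h.2]

theorem pv_nodup_filter (d : List (String × Int)) (f : String × Int → Bool)
    (h : (d.map Prod.fst).Nodup) : ((d.filter f).map Prod.fst).Nodup := by
  have hs : (d.filter f).Sublist d := (List.filter_sublist (l := d))
  exact (hs.map Prod.fst).nodup h

-- A's whole loop is one filter: an entry survives iff its key is in none of the words
theorem pv_foldl_eraseP (ws : List String) (d : List (String × Int))
    (h : (d.map Prod.fst).Nodup) :
    ws.foldl (fun d w => d.eraseP (fun p => p.1 == w)) d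
      = d.filter (fun p => decide (p.1 ∉ ws)) := by
  induction ws generalizing d with
  | nil => simp
  | cons w ws ih =>
    simp only [List.foldl_cons]
    rw [pv_eraseP_eq_filter d w h, ih _ (pv_nodup_filter d _ h), List.filter_filter]
    apply List.filter_congr
    intro p _
    by_cases hw : p.1 = w <;> simp [hw]

-- membership in the deduplicated set equals membership in the word list
theorem pv_mem_commonSet (s : String) : s ∈ pvCommonSet ↔ s ∈ pvCommonWords := by
  unfold pvCommonSet
  exact PySem.Set.mem_ofList (xs := pvCommonWords) (y := s)

-- ===== VERDICT (by name: the statement is the Claim_ definition above) =====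
theorem filter_common_words_spec : Claim_equal_filter_common_words := by
  intro data _ hpre
  unfold Spec_filter_common_words filter_common_words filter_common_words_alt
  rw [pv_foldl_eraseP _ _ hpre]
  apply List.filter_congr
  intro p _
  simp [pv_mem_commonSet]
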